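-- pv_equiv track=rewrite | github.com/bleakplain/actuary-sleuth | scripts/lib/memory/compression.py | compress_memory_context
-- ===== SOURCE A (Python) =====
-- from typing import Dict, List
--
-- def compress_memory_context(
--     memories: List[Dict],
--     max_chars: int = 2000,
-- ) -> str:
--     """按相关性智能选择记忆并压缩上下文。
--
--     Args:
--         memories: 记忆列表，每条记忆应包含 memory、created_at、score 字段
--         max_chars: 最大字符数限制
--
--     Returns:
--         压缩后的记忆上下文字符串
--     """
--     if not memories:
--         return ""
--
--     sorted_memories = sorted(
--         memories,
--         key=lambda m: m.get("score", 0) or 0,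
--         reverse=True,
--     )
--
--     lines: List[str] = []
--     total_chars = 0
--
--     for m in sorted_memories:
--         text = m.get("memory", "")
--         created_at = m.get("created_at", "")
--         date_str = created_at[:10] if created_at else ""
--
--         line = f"- {text}"
--         if date_str:
--             line += f" (记录于 {date_str})"
--
--         if total_chars + len(line) + 1 <= max_chars:
--             lines.append(line)
--             total_chars += len(line) + 1
--         else:
--             break
--
--     return "\n".join(lines)
-- ===== SOURCE B (Python) =====
-- from typing import Dict, List
--
--
-- def _format_line(m: Dict) -> str:
--     line = "- " + m.get("memory", "")
--     created_at = m.get("created_at", "")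
--     if created_at:
--         line += " (记录于 %s)" % created_at[:10]
--     return line
--
--
-- def _bisect_right(sums: List[int], x: int) -> int:
--     # hand-written bisect.bisect_right (A's module imports no stdlib helpers)
--     lo, hi = 0, len(sums)
--     while lo < hi:
--         mid = (lo + hi) // 2
--         if x < sums[mid]:
--             hi = mid
--         else:
--             lo = mid + 1
--     return lo
--
--
-- def compress_memory_context(
--     memories: List[Dict],
--     max_chars: int = 2000,
-- ) -> str:
--     if not memories:
--         return ""
--
--     ordered = sorted(
--         memories,
--         key=lambda m: m.get("score", 0) or 0,
--         reverse=True,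
--     )
--
--     lines = [_format_line(m) for m in ordered]
--
--     sums: List[int] = []
--     acc = 0
--     for ln in lines:
--         acc += len(ln) + 1
--         sums.append(acc)
--
--     k = _bisect_right(sums, max_chars)
--     return "\n".join(lines[:k])
-- ===== Notes on version B (the rewrite author's own statement) =====
-- stated objective: alternative
-- what changed: The accumulate-and-break loop over sorted memories is replaced by a map to formatted lines, a prefix-sum table of line costs, and a binary search (bisect_right) for how many lines fit, joining exactly that prefix.
import Mathlib
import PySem

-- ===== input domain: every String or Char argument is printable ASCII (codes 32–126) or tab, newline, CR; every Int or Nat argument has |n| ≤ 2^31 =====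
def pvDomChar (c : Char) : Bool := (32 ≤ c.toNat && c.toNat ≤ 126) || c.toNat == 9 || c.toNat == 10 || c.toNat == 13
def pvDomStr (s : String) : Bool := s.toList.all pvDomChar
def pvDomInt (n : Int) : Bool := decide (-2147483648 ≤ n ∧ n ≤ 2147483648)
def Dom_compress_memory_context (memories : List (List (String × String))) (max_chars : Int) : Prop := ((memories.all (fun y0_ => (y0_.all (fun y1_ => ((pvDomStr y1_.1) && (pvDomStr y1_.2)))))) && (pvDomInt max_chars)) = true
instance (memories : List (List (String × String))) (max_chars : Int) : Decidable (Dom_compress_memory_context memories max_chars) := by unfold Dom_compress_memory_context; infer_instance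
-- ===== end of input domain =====

-- B replaces A's accumulate-and-break loop by map-to-lines + prefix-sum table + binary search; same cost, different decomposition.


-- ===== PORT A =====
-- Sort key: Python computes `m.get("score", 0) or 0`. Under Pre_ every element's key is a
-- non-empty score string, or every element's key is 0 (missing or empty score): in the second
-- case all keys are equal and the stable sort is the identity, so the String key "" is exact there.
def pvScore (m : List (String × String)) : String :=
  (PySem.Dict.ofList m).getD "score" ""

-- one iteration's line: f"- {text}" plus the optional date suffix (A's body, step for step)
def pvLineA (m : List (String × String)) : List Char :=
  let text := (PySem.Dict.ofList m).getD "memory" ""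
  let created := (PySem.Dict.ofList m).getD "created_at" ""
  let dateStr := if created ≠ "" then PySem.List.slice created.toList none (some 10) else []
  let line := '-' :: ' ' :: text.toList
  if dateStr ≠ [] then line ++ (" (记录于 ".toList ++ dateStr ++ [')']) else line

-- A's for-loop with break: state = (lines, total_chars)
def pvLoopA (max_chars : Int) : List (List (String × String)) → List (List Char) → Int → List (List Char)
  | [], lines, _ => lines
  | m :: rest, lines, total =>
    let line := pvLineA m
    if total + (line.length : Int) + 1 ≤ max_chars then
      pvLoopA max_chars rest (lines ++ [line]) (total + (line.length : Int) + 1)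
    else lines

def compress_memory_context (memories : List (List (String × String))) (max_chars : Int) : String :=
  if memories = [] then "" else
  let sorted_memories := PySem.List.sorted memories pvScore true
  String.ofList (PySem.Chars.join ['\n'] (pvLoopA max_chars sorted_memories [] 0))

-- ===== PORT B =====
-- _format_line from Source B (checks created_at, suffixes created_at[:10])
def pvLineB (m : List (String × String)) : List Char :=
  let created := (PySem.Dict.ofList m).getD "created_at" ""
  let line := '-' :: ' ' :: ((PySem.Dict.ofList m).getD "memory" "").toList
  if created ≠ "" then
    line ++ (" (记录于 ".toList ++ PySem.List.slice created.toList none (some 10) ++ [')'])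
  else line

-- the prefix-sum loop from Source B: state = (sums, acc)
def pvSums (lines : List (List Char)) : List Int :=
  (lines.foldl (fun (p : List Int × Int) ln =>
      (p.1 ++ [p.2 + (ln.length : Int) + 1], p.2 + (ln.length : Int) + 1)) ([], 0)).1

def compress_memory_context_alt (memories : List (List (String × String))) (max_chars : Int) : String :=
  if memories = [] then "" else
  let ordered := PySem.List.sorted memories pvScore true
  let lines := ordered.map pvLineB
  let sums := pvSums lines
  -- Source B's hand-written _bisect_right is exactly bisect.bisect_right = PySem.List.bisectRight
  let k := PySem.List.bisectRight sums max_chars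
  String.ofList (PySem.Chars.join ['\n'] (lines.take k))

-- ===== PRECONDITION & SPEC =====
-- Pre_ excludes exactly the inputs where Python's sorted() raises TypeError: lists mixing
-- memories whose `m.get("score", 0) or 0` is a non-empty string with ones where it is 0.
def Pre_compress_memory_context (memories : List (List (String × String))) (_max_chars : Int) : Prop :=
  (∀ m ∈ memories, pvScore m ≠ "") ∨ (∀ m ∈ memories, pvScore m = "")
instance (memories : List (List (String × String))) (max_chars : Int) : Decidable (Pre_compress_memory_context memories max_chars) := by unfold Pre_compress_memory_context; infer_instance

def pvWitness_compress_memory_context : (List (List (String × String))) × Int :=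
  ([[("memory", "a"), ("score", "5")], [("memory", "b"), ("score", "10"), ("created_at", "2024-01-02T03")]], 100)

def Spec_compress_memory_context (memories : List (List (String × String))) (max_chars : Int) (out : String) : Prop := out = compress_memory_context_alt memories max_chars
instance (memories : List (List (String × String))) (max_chars : Int) (out : String) : Decidable (Spec_compress_memory_context memories max_chars out) := by unfold Spec_compress_memory_context; infer_instance

-- ===== CLAIM (what is proved, stated in full; the proofs are below) =====
def Claim_equal_compress_memory_context : Prop := ∀ (memories : List (List (String × String))) (max_chars : Int), Dom_compress_memory_context memories max_chars → Pre_compress_memory_context memories max_chars → Spec_compress_memory_context memories max_chars (compress_memory_context memories max_chars)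

-- ===== LEMMAS AND PROOFS =====

theorem pvLine_eq (m : List (String × String)) : pvLineA m = pvLineB m := by
  unfold pvLineA pvLineB
  by_cases h : (PySem.Dict.ofList m).getD "created_at" "" = ""
  · simp [h]
  · have hne : ((PySem.Dict.ofList m).getD "created_at" "").toList ≠ [] := by
      simpa [String.toList_eq_nil_iff] using h
    have : PySem.List.slice ((PySem.Dict.ofList m).getD "created_at" "").toList none (some 10) ≠ [] := by
      cases hx : ((PySem.Dict.ofList m).getD "created_at" "").toList with
      | nil => exact absurd hx hne
      | cons a t => simp [pysem]
    simp [h, this]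

-- the scan producing Source B's prefix sums, one step at a time
def pvScan (t : Int) : List (List Char) → List Int
  | [] => []
  | l :: r => (t + (l.length : Int) + 1) :: pvScan (t + (l.length : Int) + 1) r

theorem pvSums_eq_scan_aux (lines : List (List Char)) :
    ∀ (acc : List Int) (t : Int),
      (lines.foldl (fun (p : List Int × Int) ln =>
        (p.1 ++ [p.2 + (ln.length : Int) + 1], p.2 + (ln.length : Int) + 1)) (acc, t)).1
      = acc ++ pvScan t lines := by
  induction lines with
  | nil => intro acc t; simp [pvScan]
  | cons l r ih =>
      intro acc t
      simp only [List.foldl_cons, pvScan]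
      rw [ih]
      simp

theorem pvSums_eq_scan (lines : List (List Char)) : pvSums lines = pvScan 0 lines := by
  unfold pvSums
  simpa using pvSums_eq_scan_aux lines [] 0

theorem pvScan_lt (t : Int) (lines : List (List Char)) : ∀ s ∈ pvScan t lines, t < s := by
  induction lines generalizing t with
  | nil => simp [pvScan]
  | cons l r ih =>
      intro s hs
      simp only [pvScan, List.mem_cons] at hs
      rcases hs with rfl | hs
      · have : (0 : Int) ≤ (l.length : Int) := Int.natCast_nonneg _
        omega
      · have h1 := ih (t + (l.length : Int) + 1) s hs
        have : (0 : Int) ≤ (l.length : Int) := Int.natCast_nonneg _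
        omega

theorem pvScan_pairwise (t : Int) (lines : List (List Char)) :
    (pvScan t lines).Pairwise (fun a b => a ≤ b) := by
  induction lines generalizing t with
  | nil => simp [pvScan]
  | cons l r ih =>
      simp only [pvScan, List.pairwise_cons]
      refine ⟨fun s hs => le_of_lt (pvScan_lt _ _ s hs), ih _⟩

-- takeWhile length from the bisect bracketing
theorem takeWhile_len_eq (p : Int → Bool) :
    ∀ (xs : List Int) (k : Nat), k ≤ xs.length →
      (∀ j (hj : j < xs.length), j < k → p xs[j]) →
      (∀ j (hj : j < xs.length), k ≤ j → ¬ p xs[j]) →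
      (xs.takeWhile p).length = k := by
  intro xs
  induction xs with
  | nil =>
      intro k hk _ _
      have : k = 0 := by simpa using hk
      simp [this]
  | cons x r ih =>
      intro k hk h1 h2
      cases k with
      | zero =>
          have := h2 0 (by simp) (by omega)
          simp only [List.getElem_cons_zero] at this
          simp [Bool.of_not_eq_true this]
      | succ k' =>
          have hx := h1 0 (by simp) (by omega)
          simp only [List.getElem_cons_zero] at hx
          simp only [List.takeWhile_cons, hx, if_true, List.length_cons]
          have := ih k' (by simpa using hk)
            (fun j hj hjk => by
              have := h1 (j+1) (by simpa using Nat.succ_lt_succ hj) (by omega)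
              simpa using this)
            (fun j hj hjk => by
              have := h2 (j+1) (by simpa using Nat.succ_lt_succ hj) (by omega)
              simpa using this)
          omega

theorem bisect_eq_takeWhile (xs : List Int) (x : Int)
    (hs : xs.Pairwise (fun a b => a ≤ b)) :
    PySem.List.bisectRight xs x = (xs.takeWhile (fun s => decide (s ≤ x))).length := by
  obtain ⟨hle, h1, h2⟩ := PySem.List.bisectRight_spec xs x hs
  exact (takeWhile_len_eq _ xs _ hle
    (fun j hj hjk => by simpa using h1 j hj hjk)
    (fun j hj hjk => by simpa using h2 j hj hjk)).symm

-- A's loop appends the longest prefix of lines whose running totals stay within max_chars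
theorem pvLoopA_eq_take (max_chars : Int) :
    ∀ (ms : List (List (String × String))) (acc : List (List Char)) (t : Int),
      pvLoopA max_chars ms acc t
        = acc ++ (ms.map pvLineB).take
            ((pvScan t (ms.map pvLineB)).takeWhile (fun s => decide (s ≤ max_chars))).length := by
  intro ms
  induction ms with
  | nil => intro acc t; simp [pvLoopA, pvScan]
  | cons m rest ih =>
      intro acc t
      simp only [pvLoopA, List.map_cons, pvScan, pvLine_eq m]
      by_cases h : t + ((pvLineB m).length : Int) + 1 ≤ max_chars
      · simp only [h, if_pos, List.takeWhile_cons]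
        rw [ih]
        simp
      · simp [h]

theorem compress_eq (memories : List (List (String × String))) (max_chars : Int) :
    compress_memory_context memories max_chars = compress_memory_context_alt memories max_chars := by
  unfold compress_memory_context compress_memory_context_alt
  by_cases hnil : memories = []
  · simp [hnil]
  · simp only [hnil, ite_false]
    rw [pvLoopA_eq_take, pvSums_eq_scan,
      bisect_eq_takeWhile _ _ (pvScan_pairwise 0 _)]
    simp

-- ===== VERDICT (by name: the statement is the Claim_ definition above) =====
theorem compress_memory_context_spec : Claim_equal_compress_memory_context := by
  intro memories max_chars _ _
  exact compress_eq memories max_chars
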